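-- pv_equiv track=rewrite | github.com/karimlasri/extraction_SR | src/extraction/get_tables/utils.py | find_intervals_max_positions
-- ===== SOURCE A (Python) =====
-- def find_intervals_max_positions(data):
--     """
--     Finds intervals between each pair of indices where the maximum value occurs in the list.
--
--     Parameters:
--     data (list): The list to analyze.
--
--     Returns:
--     list: A list of intervals between each pair of indices where the maximum value occurs.
--     """
--     # Find the maximum value in the list
--     max_value = max(data)
--
--     # Find all indices where the maximum value occurs
--     max_positions = [index for index, value in enumerate(data) if value == max_value]
--
--     # Create intervals between each pair of indices and ensure all indices are covered
--     intervals = []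
--     if max_positions:
--         # Add interval from start to first maximum position
--         if max_positions[0] > 0:
--             intervals.append(list(range(0, max_positions[0])))
--
--         # Add intervals between each pair of maximum positions
--         for i in range(len(max_positions) - 1):
--             intervals.append(list(range(max_positions[i], max_positions[i + 1])))
--
--         # Add interval from last maximum position to end
--         intervals.append(list(range(max_positions[-1], len(data))))
--
--     return intervals
-- ===== SOURCE B (Python) =====
-- def find_intervals_max_positions(data):
--     max_value = max(data)
--     intervals = []
--     current = []
--     for index, value in enumerate(data):
--         if value == max_value:
--             if current:
--                 intervals.append(current)
--             current = [index]
--         else: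
--             current.append(index)
--     intervals.append(current)
--     return intervals
-- ===== Notes on version B (the rewrite author's own statement) =====
-- stated objective: simpler
-- what changed: B partitions the indices in a single pass over enumerate(data) with a running current-segment accumulator, instead of first materialising the list of max positions and then building range() intervals between consecutive pairs.
import Mathlib
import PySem

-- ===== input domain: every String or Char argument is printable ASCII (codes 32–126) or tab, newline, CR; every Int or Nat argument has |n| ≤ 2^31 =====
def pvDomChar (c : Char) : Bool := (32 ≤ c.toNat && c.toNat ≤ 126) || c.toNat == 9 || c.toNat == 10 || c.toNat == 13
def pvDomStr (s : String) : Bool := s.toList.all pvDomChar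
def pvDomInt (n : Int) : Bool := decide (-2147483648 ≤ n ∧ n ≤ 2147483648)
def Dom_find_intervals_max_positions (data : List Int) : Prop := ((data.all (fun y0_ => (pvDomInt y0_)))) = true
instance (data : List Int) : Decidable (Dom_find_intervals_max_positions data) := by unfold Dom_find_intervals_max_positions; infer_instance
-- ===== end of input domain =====

-- B replaces A's "collect max positions, then build ranges between consecutive pairs" by a
-- single pass that accumulates the current index segment and cuts it at each maximum (simpler decomposition).


-- ===== PORT A =====
def find_intervals_max_positions (data : List Int) : List (List Int) :=
  match PySem.List.max? data (fun x => x) with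
  | none => []  -- max(data) raises ValueError on []; excluded by Pre_
  | some maxValue =>
    let maxPositions : List Int :=
      (PySem.List.enumerate data 0).filterMap (fun p => if p.2 = maxValue then some p.1 else none)
    if maxPositions.isEmpty then []
    else
      let intervals1 : List (List Int) :=
        if PySem.List.pyGetD maxPositions 0 0 > 0 then
          [PySem.List.pyRange 0 (PySem.List.pyGetD maxPositions 0 0) 1]
        else []
      let intervals2 : List (List Int) :=
        (PySem.List.pyRange 0 ((maxPositions.length : Int) - 1) 1).foldl
          (fun acc i => acc ++ [PySem.List.pyRange (PySem.List.pyGetD maxPositions i 0)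
                                  (PySem.List.pyGetD maxPositions (i + 1) 0) 1]) intervals1
      intervals2 ++ [PySem.List.pyRange (PySem.List.pyGetD maxPositions (-1) 0) ((data.length : Int)) 1]

-- ===== PORT B =====
def pvAltStep (maxValue : Int) (st : List (List Int) × List Int) (p : Int × Int) : List (List Int) × List Int :=
  if p.2 = maxValue then
    ((if st.2.isEmpty then st.1 else st.1 ++ [st.2]), [p.1])
  else
    (st.1, st.2 ++ [p.1])

def find_intervals_max_positions_alt (data : List Int) : List (List Int) :=
  match PySem.List.max? data (fun x => x) with
  | none => []  -- max(data) raises ValueError on []; excluded by Pre_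
  | some maxValue =>
    let st := (PySem.List.enumerate data 0).foldl (pvAltStep maxValue) ([], [])
    st.1 ++ [st.2]

-- ===== PRECONDITION & SPEC =====
-- Pre_: max(data) raises ValueError on the empty list, in both A and B.
def Pre_find_intervals_max_positions (data : List Int) : Prop := data ≠ []
instance (data : List Int) : Decidable (Pre_find_intervals_max_positions data) := by
  unfold Pre_find_intervals_max_positions; infer_instance

def pvWitness_find_intervals_max_positions : List Int := [1, 3, 2, 3, 0]

def Spec_find_intervals_max_positions (data : List Int) (out : List (List Int)) : Prop := out = find_intervals_max_positions_alt data
instance (data : List Int) (out : List (List Int)) : Decidable (Spec_find_intervals_max_positions data out) := by unfold Spec_find_intervals_max_positions; infer_instance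

-- ===== CLAIM (what is proved, stated in full; the proofs are below) =====
def Claim_equal_find_intervals_max_positions : Prop := ∀ (data : List Int), Dom_find_intervals_max_positions data → Pre_find_intervals_max_positions data → Spec_find_intervals_max_positions data (find_intervals_max_positions data)

-- ===== LEMMAS AND PROOFS =====

-- indices (from offset k) at which the value m occurs
def pvPosns (m k : Int) : List Int → List Int
  | [] => []
  | x :: xs => if x = m then k :: pvPosns m (k + 1) xs else pvPosns m (k + 1) xs

-- the partition of the index range [·, n) cut at the given positions
def pvChunks : List Int → Int → List (List Int)
  | [], _ => []
  | [a], n => [PySem.List.pyRange a n 1]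
  | a :: b :: t, n => PySem.List.pyRange a b 1 :: pvChunks (b :: t) n

theorem pvPosns_ge (m : Int) : ∀ (xs : List Int) (k p : Int), p ∈ pvPosns m k xs → k ≤ p := by
  intro xs
  induction xs with
  | nil => intro k p h; simp [pvPosns] at h
  | cons x xs ih =>
    intro k p h
    simp only [pvPosns] at h
    split at h
    · rcases List.mem_cons.mp h with h | h
      · omega
      · have := ih (k + 1) p h; omega
    · have := ih (k + 1) p h; omega

theorem pvPosns_ne_nil (m : Int) : ∀ (xs : List Int) (k : Int), m ∈ xs → pvPosns m k xs ≠ [] := by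
  intro xs
  induction xs with
  | nil => intro k h; simp at h
  | cons x xs ih =>
    intro k h
    simp only [pvPosns]
    rcases List.mem_cons.mp h with h | h
    · simp [h]
    · split
      · simp
      · exact ih (k + 1) h

theorem filterMap_enumerate_eq_posns (m : Int) : ∀ (xs : List Int) (k : Int),
    (PySem.List.enumerate xs k).filterMap (fun p => if p.2 = m then some p.1 else none) = pvPosns m k xs := by
  intro xs
  induction xs with
  | nil => intro k; simp [PySem.List.enumerate_nil, pvPosns]
  | cons x xs ih =>
    intro k
    rw [PySem.List.enumerate_cons]
    simp only [List.filterMap_cons, pvPosns]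
    by_cases h : x = m <;> simp [h, ih]

-- characterisation of B's fold
theorem alt_fold_char (m : Int) : ∀ (xs : List Int) (k : Int) (acc : List (List Int)) (cur : List Int),
    (((PySem.List.enumerate xs k).foldl (pvAltStep m) (acc, cur)).1
      ++ [((PySem.List.enumerate xs k).foldl (pvAltStep m) (acc, cur)).2]) =
    (match pvPosns m k xs with
     | [] => acc ++ [cur ++ PySem.List.pyRange k (k + xs.length) 1]
     | p0 :: rest =>
        acc ++ (if (cur ++ PySem.List.pyRange k p0 1).isEmpty then [] else [cur ++ PySem.List.pyRange k p0 1])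
            ++ pvChunks (p0 :: rest) (k + xs.length)) := by
  intro xs
  induction xs with
  | nil =>
    intro k acc cur
    simp only [PySem.List.enumerate_nil, List.foldl_nil, pvPosns, List.length_nil,
      Int.natCast_zero, add_zero]
    rw [PySem.List.pyRange_one_eq_nil (le_refl k)]
    simp
  | cons x xs ih =>
    intro k acc cur
    rw [PySem.List.enumerate_cons]
    simp only [List.foldl_cons]
    have hlen : ((x :: xs).length : Int) = (xs.length : Int) + 1 := by
      simp [List.length_cons]
    have hnn : (0 : Int) ≤ (xs.length : Int) := Int.natCast_nonneg _
    have harith : k + ((xs.length : Int) + 1) = k + 1 + (xs.length : Int) := by ring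
    by_cases hx : x = m
    · have hstep : pvAltStep m (acc, cur) (k, x)
          = ((if cur.isEmpty then acc else acc ++ [cur]), [k]) := by
        simp [pvAltStep, hx]
      rw [hstep, ih]
      simp only [pvPosns, if_pos hx, hlen]
      rw [PySem.List.pyRange_one_eq_nil (le_refl k)]
      cases hp : pvPosns m (k + 1) xs with
      | nil =>
        dsimp only
        have hk : k < k + ((xs.length : Int) + 1) := by omega
        simp only [pvChunks]
        rw [PySem.List.pyRange_one_cons hk, harith]
        cases cur <;> simp
      | cons q0 rest =>
        dsimp only
        have hq0 : k + 1 ≤ q0 := pvPosns_ge m xs (k + 1) q0 (by rw [hp]; exact List.mem_cons_self)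
        have hkq : k < q0 := by omega
        simp only [pvChunks]
        rw [PySem.List.pyRange_one_cons hkq, harith]
        cases cur <;> simp
    · have hstep : pvAltStep m (acc, cur) (k, x) = (acc, cur ++ [k]) := by
        simp [pvAltStep, hx]
      rw [hstep, ih]
      simp only [pvPosns, if_neg hx, hlen]
      cases hp : pvPosns m (k + 1) xs with
      | nil =>
        dsimp only
        have hk : k < k + ((xs.length : Int) + 1) := by omega
        rw [PySem.List.pyRange_one_cons hk, harith]
        simp
      | cons q0 rest =>
        dsimp only
        have hq0 : k + 1 ≤ q0 := pvPosns_ge m xs (k + 1) q0 (by rw [hp]; exact List.mem_cons_self)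
        have hkq : k < q0 := by omega
        rw [PySem.List.pyRange_one_cons hkq, harith]
        simp

-- pyGetD on a cons with a shifted nonnegative index
theorem pvGetD_cons_succ (x : Int) (xs : List Int) (i : Int) (d : Int) (h : 0 ≤ i) :
    PySem.List.pyGetD (x :: xs) (i + 1) d = PySem.List.pyGetD xs i d := by
  have h1 : i = ((i.toNat : Nat) : Int) := (Int.toNat_of_nonneg h).symm
  rw [h1]
  have h2 : ((i.toNat : Nat) : Int) + 1 = ((i.toNat + 1 : Nat) : Int) := by push_cast; ring
  rw [h2, PySem.List.pyGetD_natCast, PySem.List.pyGetD_natCast]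
  simp

-- peel the first index off a range(0, c+1) loop
theorem pvMap_pyRange_shift {α : Type} (g : Int → α) (c : Int) (hc : 0 ≤ c) :
    (PySem.List.pyRange 0 (c + 1) 1).map g
      = g 0 :: (PySem.List.pyRange 0 c 1).map (fun i => g (i + 1)) := by
  rw [PySem.List.pyRange_one_cons (by omega), List.map_cons]
  congr 1
  rw [PySem.List.pyRange_one, PySem.List.pyRange_one]
  simp only [List.map_map]
  have hc' : (c + 1 - (0 + 1)).toNat = (c - 0).toNat := by omega
  rw [hc']
  apply List.map_congr_left
  intro k hk
  simp only [Function.comp_apply]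
  congr 1
  ring

-- characterisation of A's middle loop + last interval
theorem a_mid_char (n : Int) : ∀ (mp : List Int), mp ≠ [] →
    ((PySem.List.pyRange 0 ((mp.length : Int) - 1) 1).map
        (fun i => PySem.List.pyRange (PySem.List.pyGetD mp i 0) (PySem.List.pyGetD mp (i + 1) 0) 1))
      ++ [PySem.List.pyRange (PySem.List.pyGetD mp (-1) 0) n 1] = pvChunks mp n := by
  intro mp
  induction mp with
  | nil => intro h; exact absurd rfl h
  | cons a t ih =>
    intro _
    cases t with
    | nil =>
      have h1 : ((([a] : List Int).length : Int)) - 1 = 0 := by simp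
      rw [h1, PySem.List.pyRange_one_eq_nil (le_refl 0)]
      rw [PySem.List.pyGetD_neg_one [a] 0 (by simp)]
      simp [pvChunks]
    | cons b t' =>
      have hlen : (((a :: b :: t').length : Int)) - 1 = ((t'.length : Int)) + 1 := by
        simp only [List.length_cons]
        push_cast
        ring
      rw [hlen, pvMap_pyRange_shift _ _ (Int.natCast_nonneg _)]
      have hlast : PySem.List.pyGetD (a :: b :: t') (-1) 0 = PySem.List.pyGetD (b :: t') (-1) 0 := by
        rw [PySem.List.pyGetD_neg_one (a :: b :: t') 0 (by simp),
          PySem.List.pyGetD_neg_one (b :: t') 0 (by simp)]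
        exact List.getLast_cons_cons
      have hhead : PySem.List.pyGetD (a :: b :: t') (0 + 1) 0 = b := by
        rw [pvGetD_cons_succ _ _ _ _ le_rfl, PySem.List.pyGetD_zero_cons]
      have htail : (PySem.List.pyRange 0 ((t'.length : Int)) 1).map
            (fun i => PySem.List.pyRange (PySem.List.pyGetD (a :: b :: t') (i + 1) 0)
                        (PySem.List.pyGetD (a :: b :: t') (i + 1 + 1) 0) 1)
          = (PySem.List.pyRange 0 (((b :: t').length : Int) - 1) 1).map
            (fun i => PySem.List.pyRange (PySem.List.pyGetD (b :: t') i 0)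
                        (PySem.List.pyGetD (b :: t') (i + 1) 0) 1) := by
        have hl2 : (((b :: t').length : Int)) - 1 = ((t'.length : Int)) := by
          simp only [List.length_cons]; push_cast; ring
        rw [hl2]
        apply List.map_congr_left
        intro i hi
        have hi0 : 0 ≤ i := (PySem.List.mem_pyRange_one.mp hi).1
        rw [pvGetD_cons_succ _ _ _ _ hi0, pvGetD_cons_succ _ _ _ _ (by omega)]
      simp only [List.cons_append]
      rw [hlast, hhead, htail, ih (by simp), PySem.List.pyGetD_zero_cons]
      simp [pvChunks]

-- ===== VERDICT (by name: the statement is the Claim_ definition above) =====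
theorem find_intervals_max_positions_spec : Claim_equal_find_intervals_max_positions := by
  intro data _ hpre
  unfold Spec_find_intervals_max_positions
  unfold find_intervals_max_positions find_intervals_max_positions_alt
  cases hmax : PySem.List.max? data (fun x => x) with
  | none => exact absurd ((PySem.List.max?_eq_none_iff data (fun x => x)).mp hmax) hpre
  | some m =>
    simp only []
    have hmem : m ∈ data := PySem.List.max?_mem hmax
    have hmp := filterMap_enumerate_eq_posns m data 0
    cases hps : pvPosns m 0 data with
    | nil => exact absurd hps (pvPosns_ne_nil m data 0 hmem)
    | cons p0 rest =>
      have hp0 : (0 : Int) ≤ p0 := pvPosns_ge m data 0 p0 (by rw [hps]; exact List.mem_cons_self)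
      rw [hmp, hps]
      have hB := alt_fold_char m data 0 ([] : List (List Int)) ([] : List Int)
      rw [hps] at hB
      dsimp only at hB
      rw [hB]
      simp only [List.isEmpty_cons, List.nil_append, zero_add,
        PySem.List.pyGetD_zero_cons, Bool.false_eq_true, if_false]
      rw [PySem.List.foldl_append_singleton_eq_map]
      rw [List.append_assoc, a_mid_char ((data.length : Int)) (p0 :: rest) (by simp)]
      by_cases hpos : p0 > 0
      · rw [if_pos hpos]
        have : (PySem.List.pyRange 0 p0 1).isEmpty = false := by
          rw [PySem.List.pyRange_one_cons hpos]
          simp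
        rw [this]
        simp
      · rw [if_neg hpos]
        have hz : p0 = 0 := by omega
        rw [hz, PySem.List.pyRange_one_eq_nil (le_refl 0)]
        simp
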